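-- pv_equiv track=rewrite | github.com/josecatela/sgcodewars | day15/day15.py | Yang_day15
-- ===== SOURCE A (Python) =====
-- import itertools
--
-- def Yang_day15(arr):
--     if not arr: return {"pos":[],"peaks":[]}
--     ll,index = [],[]
--     for v,g in itertools.groupby(enumerate(arr), key = lambda k:k[1]):
--          ll.append(v)
--          index.append(next(g)[0])
--     ll[:0] = [arr[0]]
--     ll.append(arr[-1])
--     idx = 0
--     val,pos = [],[]
--     for i,x in enumerate(ll[1:-1],1):
--         if ll[i-1] < x and x > ll[i+1]:
--             val.append(x)
--             pos.append(index[i-1])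
--     return {"pos":pos,"peaks":val}
-- ===== SOURCE B (Python) =====
-- def Yang_day15(arr):
--     # single streaming pass over runs: prev run value, current run value and its start index
--     if not arr:
--         return {"pos": [], "peaks": []}
--     pos, peaks = [], []
--     prev = None
--     run_val, run_idx = arr[0], 0
--     for i in range(1, len(arr)):
--         if arr[i] != run_val:
--             if prev is not None and prev < run_val and run_val > arr[i]:
--                 peaks.append(run_val)
--                 pos.append(run_idx)
--             prev, run_val, run_idx = run_val, arr[i], i
--     return {"pos": pos, "peaks": peaks}
-- ===== Notes on version B (the rewrite author's own statement) =====
-- stated objective: faster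
-- what changed: A collapses the array into run values via itertools.groupby, pads the collapsed list with the endpoints and then scans it by index; B fuses everything into one streaming pass over the raw array that tracks the previous run value, the current run value and its start index, flagging a peak at each run boundary.
import Mathlib
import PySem

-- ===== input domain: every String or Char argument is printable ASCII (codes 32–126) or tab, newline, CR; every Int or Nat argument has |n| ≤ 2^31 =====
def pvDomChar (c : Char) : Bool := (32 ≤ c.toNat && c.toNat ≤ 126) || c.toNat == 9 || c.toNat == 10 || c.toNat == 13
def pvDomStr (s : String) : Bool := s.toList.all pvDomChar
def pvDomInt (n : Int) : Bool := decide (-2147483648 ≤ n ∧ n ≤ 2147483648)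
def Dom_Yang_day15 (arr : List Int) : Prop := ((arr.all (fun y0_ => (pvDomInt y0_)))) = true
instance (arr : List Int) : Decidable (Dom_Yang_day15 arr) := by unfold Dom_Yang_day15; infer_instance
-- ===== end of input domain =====

-- B replaces A's groupby-collapse-then-indexed-scan with one fused streaming pass over the raw
-- array (measured faster by a constant factor; same return value).

-- ===== PORT A =====
-- hand port of the itertools.groupby loop over enumerate(arr): for each maximal run of equal
-- values, its value is appended to ll and the index of its first element to index; exact.
def yangGroup (i : Int) (cur : Option Int) : List Int → List Int × List Int
  | [] => ([], [])
  | x :: r =>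
    if cur = some x then yangGroup (i + 1) cur r
    else
      let rest := yangGroup (i + 1) (some x) r
      (x :: rest.1, i :: rest.2)

def Yang_day15 (arr : List Int) : List (String × List Int) :=
  match arr with
  | [] => [("pos", []), ("peaks", [])]
  | a :: _ =>
    let gi := yangGroup 0 none arr
    let ll := gi.1
    let index := gi.2
    -- ll[:0] = [arr[0]]; ll.append(arr[-1])
    let ll2 := a :: (ll ++ [PySem.List.pyGetD arr (-1) 0])
    -- for i,x in enumerate(ll[1:-1],1): uses ll[i-1], x = ll[i], ll[i+1], index[i-1];
    -- read via ll2 zipped with its tails and index (every index is in range, so exact)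
    let det := (List.zip (List.zip ll2 ll2.tail) (List.zip ll2.tail.tail index)).foldl
      (fun (st : List Int × List Int) q =>
        if q.1.1 < q.1.2 ∧ q.1.2 > q.2.1 then (st.1 ++ [q.1.2], st.2 ++ [q.2.2]) else st)
      ([], [])
    [("pos", det.2), ("peaks", det.1)]

-- ===== PORT B =====
-- state: st = (peaks, pos), prev = previous run value, runVal/runIdx = current run, i = index
def yangAltGo : List Int → Option Int → Int → Int → Int → List Int × List Int → List Int × List Int
  | [], _, _, _, _, st => st
  | x :: r, prev, runVal, runIdx, i, st =>
    if x ≠ runVal then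
      let st' := if (match prev with
                     | none => false
                     | some p => decide (p < runVal ∧ runVal > x))
                 then (st.1 ++ [runVal], st.2 ++ [runIdx]) else st
      yangAltGo r (some runVal) x i (i + 1) st'
    else yangAltGo r prev runVal runIdx (i + 1) st

def Yang_day15_alt (arr : List Int) : List (String × List Int) :=
  match arr with
  | [] => [("pos", []), ("peaks", [])]
  | a :: tl =>
    let st := yangAltGo tl none a 0 1 ([], [])
    [("pos", st.2), ("peaks", st.1)]

-- ===== PRECONDITION & SPEC =====
def Spec_Yang_day15 (arr : List Int) (out : List (String × List Int)) : Prop := out = Yang_day15_alt arr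
instance (arr : List Int) (out : List (String × List Int)) : Decidable (Spec_Yang_day15 arr out) := by unfold Spec_Yang_day15; infer_instance

-- ===== CLAIM (what is proved, stated in full; the proofs are below) =====
def Claim_equal_Yang_day15 : Prop := ∀ (arr : List Int), Dom_Yang_day15 arr → Spec_Yang_day15 arr (Yang_day15 arr)

-- ===== LEMMAS AND PROOFS =====

-- the runs of v :: l, as (value, start index) pairs, where the run of v started at index s
-- and the next element of l has index i
def pvRunsFrom (v s i : Int) : List Int → List (Int × Int)
  | [] => [(v, s)]
  | x :: r => if x = v then pvRunsFrom v s (i + 1) r else (v, s) :: pvRunsFrom x i (i + 1) r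

-- peak scan over the run list; the last run is never a peak, the first only if prev allows
def pvScan : Option Int → List (Int × Int) → List Int × List Int
  | _, [] => ([], [])
  | _, [_] => ([], [])
  | prev, (v, s) :: (w, t) :: rest =>
    let tl := pvScan (some v) ((w, t) :: rest)
    if (match prev with
        | none => false
        | some p => decide (p < v ∧ v > w))
    then (v :: tl.1, s :: tl.2) else tl

-- the step function of port A's detection fold (definitionally equal to the lambda in the port)
def pvDetStep (st : List Int × List Int) (q : (Int × Int) × (Int × Int)) : List Int × List Int :=
  if q.1.1 < q.1.2 ∧ q.1.2 > q.2.1 then (st.1 ++ [q.1.2], st.2 ++ [q.2.2]) else st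

theorem pvLast_cons (a : Int) (l : List Int) (h : (a :: l) ≠ []) :
    (a :: l).getLast h = l.getLastD a := by
  induction l generalizing a with
  | nil => rfl
  | cons b r ih =>
    rw [List.getLast_cons (by simp : (b :: r) ≠ []), ih b (by simp), List.getLastD_cons]

theorem pvRunsFrom_cons (l : List Int) (v s i : Int) :
    ∃ t, pvRunsFrom v s i l = (v, s) :: t := by
  induction l generalizing v s i with
  | nil => exact ⟨[], rfl⟩
  | cons x r ih =>
    by_cases h : x = v
    · subst h
      simpa [pvRunsFrom] using ih x s (i + 1)
    · exact ⟨pvRunsFrom x i (i + 1) r, by simp [pvRunsFrom, h]⟩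

theorem pvRunsFrom_last (l : List Int) (v s i : Int) :
    ((pvRunsFrom v s i l).getLastD (0, 0)).1 = l.getLastD v := by
  induction l generalizing v s i with
  | nil => rfl
  | cons x r ih =>
    by_cases h : x = v
    · subst h
      rw [show pvRunsFrom x s i (x :: r) = pvRunsFrom x s (i + 1) r from by
            simp [pvRunsFrom],
          List.getLastD_cons]
      exact ih x s (i + 1)
    · obtain ⟨t, ht⟩ := pvRunsFrom_cons r x i (i + 1)
      have hthis := ih x i (i + 1)
      rw [ht, List.getLastD_cons] at hthis
      rw [show pvRunsFrom v s i (x :: r) = (v, s) :: (x, i) :: t from by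
            simp [pvRunsFrom, h, ht],
          List.getLastD_cons, List.getLastD_cons, List.getLastD_cons]
      exact hthis

theorem yangGroup_eq (l : List Int) (v s i : Int) :
    yangGroup i (some v) l =
      (((pvRunsFrom v s i l).tail).map Prod.fst, ((pvRunsFrom v s i l).tail).map Prod.snd) := by
  induction l generalizing v s i with
  | nil => simp [yangGroup, pvRunsFrom]
  | cons x r ih =>
    by_cases h : x = v
    · subst h
      simpa [yangGroup, pvRunsFrom] using ih x s (i + 1)
    · obtain ⟨t, ht⟩ := pvRunsFrom_cons r x i (i + 1)
      have hg : yangGroup i (some v) (x :: r) =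
          (x :: (yangGroup (i + 1) (some x) r).1, i :: (yangGroup (i + 1) (some x) r).2) := by
        simp only [yangGroup]
        rw [if_neg (fun e : some v = some x => h (Option.some.inj e).symm)]
      rw [hg, ih x i (i + 1), ht]
      simp [pvRunsFrom, h, ht]

-- the detection fold of port A, over the zipped neighbour lists, computes pvScan
theorem detect_eq (R : List (Int × Int)) (prev w : Int) (acc : List Int × List Int)
    (hne : R ≠ []) (hw : (R.getLastD (0, 0)).1 = w) :
    (List.zip (List.zip (prev :: (R.map Prod.fst ++ [w])) (R.map Prod.fst ++ [w]))
        (List.zip ((R.map Prod.fst).tail ++ [w]) (R.map Prod.snd))).foldl pvDetStep acc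
    = (acc.1 ++ (pvScan (some prev) R).1, acc.2 ++ (pvScan (some prev) R).2) := by
  induction R generalizing prev acc with
  | nil => exact absurd rfl hne
  | cons p R' ih =>
    obtain ⟨v, s⟩ := p
    cases R' with
    | nil =>
      rw [List.getLastD_cons] at hw
      simp only [List.getLastD_nil] at hw
      subst hw
      simp [pvScan, pvDetStep, List.zip]
    | cons q rest =>
      obtain ⟨u, t⟩ := q
      have hw' : (((u, t) :: rest).getLastD (0, 0)).1 = w := by
        rw [List.getLastD_cons] at hw
        rw [show (((u, t) :: rest).getLastD (0, 0)) = (((u, t) :: rest).getLastD (v, s)) from by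
              rw [List.getLastD_cons, List.getLastD_cons]]
        exact hw
      have step := ih v
      simp only [List.map_cons, List.cons_append, List.tail_cons, List.zip_cons_cons,
        List.foldl_cons] at step ⊢
      have hhead : pvDetStep acc ((prev, v), (u, s)) =
          if prev < v ∧ v > u then (acc.1 ++ [v], acc.2 ++ [s]) else acc := rfl
      by_cases hc : prev < v ∧ v > u
      · rw [hhead, if_pos hc, step (acc.1 ++ [v], acc.2 ++ [s]) (by simp) hw']
        simp [pvScan, hc.1, hc.2]
      · rw [hhead, if_neg hc, step acc (by simp) hw']
        have hcd : (decide (prev < v ∧ v > u)) = false := by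
          simpa using hc
        simp [pvScan, hcd]

theorem yangAltGo_eq (l : List Int) (prev : Option Int) (v s i : Int) (st : List Int × List Int) :
    yangAltGo l prev v s i st =
      (st.1 ++ (pvScan prev (pvRunsFrom v s i l)).1,
       st.2 ++ (pvScan prev (pvRunsFrom v s i l)).2) := by
  induction l generalizing prev v s i st with
  | nil => simp [yangAltGo, pvRunsFrom, pvScan]
  | cons x r ih =>
    by_cases h : x = v
    · subst h
      simpa [yangAltGo, pvRunsFrom] using ih prev x s (i + 1) st
    · obtain ⟨t, ht⟩ := pvRunsFrom_cons r x i (i + 1)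
      cases prev with
      | none =>
        simp only [yangAltGo, ne_eq, h, not_false_iff, if_true, Bool.false_eq_true, if_false]
        rw [ih (some v) x i (i + 1) st]
        simp [pvRunsFrom, h, ht, pvScan]
      | some p =>
        simp only [yangAltGo, ne_eq, h, not_false_iff, if_true]
        by_cases hc : p < v ∧ v > x
        · rw [if_pos (by simpa using hc), ih (some v) x i (i + 1) (st.1 ++ [v], st.2 ++ [s])]
          simp [pvRunsFrom, h, ht, pvScan, hc.1, hc.2]
        · rw [if_neg (by simpa using hc), ih (some v) x i (i + 1) st]
          have hcd : (decide (p < v ∧ v > x)) = false := by simpa using hc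
          simp [pvRunsFrom, h, ht, pvScan, hcd]

theorem pvScan_first (a : Int) (t : List (Int × Int)) (s : Int) :
    pvScan (some a) ((a, s) :: t) = pvScan none ((a, s) :: t) := by
  cases t with
  | nil => simp [pvScan]
  | cons q rest => simp [pvScan]

-- ===== VERDICT (by name: the statement is the Claim_ definition above) =====
theorem Yang_day15_spec : Claim_equal_Yang_day15 := by
  intro arr _
  unfold Spec_Yang_day15
  cases arr with
  | nil => rfl
  | cons a tl =>
    obtain ⟨t, ht⟩ := pvRunsFrom_cons tl a 0 1
    have hgroup : yangGroup 0 none (a :: tl) =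
        (a :: t.map Prod.fst, (0 : Int) :: t.map Prod.snd) := by
      have h1 : yangGroup 0 none (a :: tl) =
          (a :: (yangGroup (0 + 1) (some a) tl).1, (0 : Int) :: (yangGroup (0 + 1) (some a) tl).2) := by
        simp only [yangGroup]
        rw [if_neg (by simp)]
      rw [h1, show (0 : Int) + 1 = 1 from rfl, yangGroup_eq tl a 0 1, ht]
      simp
    have hlast : PySem.List.pyGetD (a :: tl) (-1) 0 = tl.getLastD a := by
      rw [PySem.List.pyGetD_neg_one (a :: tl) 0 (by simp)]
      exact pvLast_cons a tl (by simp)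
    have hRlast : (((a, 0) :: t).getLastD (0, 0)).1 = tl.getLastD a := by
      rw [← ht]; exact pvRunsFrom_last tl a 0 1
    show Yang_day15 (a :: tl) = Yang_day15_alt (a :: tl)
    unfold Yang_day15 Yang_day15_alt
    have hdet := detect_eq ((a, 0) :: t) a (tl.getLastD a) ([], []) (by simp) hRlast
    simp only [List.map_cons, List.cons_append, List.tail_cons] at hdet
    simp only [hgroup, hlast, List.cons_append, List.tail_cons]
    rw [show (fun (st : List Int × List Int) (q : (Int × Int) × (Int × Int)) =>
          if q.1.1 < q.1.2 ∧ q.1.2 > q.2.1 then (st.1 ++ [q.1.2], st.2 ++ [q.2.2]) else st)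
        = pvDetStep from rfl]
    rw [hdet]
    rw [yangAltGo_eq tl none a 0 1 ([], [])]
    simp only [ht, pvScan_first a t 0]
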